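-- pv_equiv track=rewrite | github.com/JuanDelAguila/ManMetHacks-2.0 | Sentiment.py | prettySplitBySentences
-- ===== SOURCE A (Python) =====
-- import string
-- import itertools
--
-- def prettySplitBySentences (data):
--     sentenceData = []
--     while len(data) != 0:
--         untilPeriod = myTakeWhileInclusive(data, lambda w: not (w[-1] == '.'))
--         if (len(data) > len(untilPeriod)):
--             nextWord = data[len(untilPeriod)]
--             if nextWord[0].isupper():
--                 sentenceData += [untilPeriod]
--                 data = data[len(untilPeriod):]
--             else:
--                 removePeriod = ''.join(list(filter(lambda x: x != '.', data[len(untilPeriod)-1])))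
--                 data[len(untilPeriod)-1] = removePeriod
--         else:
--             sentenceData += [untilPeriod]
--             data = []
--     return prettyReadableCharacters (sentenceData)
--
-- def myTakeWhileInclusive (text, predicate):
--     product = list (itertools.takewhile(predicate, text))
--     if (len(text) > len(product)):
--         product += [text[len(product)]]
--     return product
--
-- def prettyReadableCharacters (sentences):
--     permitedCharacters = string.ascii_letters + "-,.;:‘’—" + "1234567890" + "$€" + "“”" + "?!"
--     for sentenceIndex in range (0, len(sentences)):
--         sentence = sentences[sentenceIndex]
--         for wordIndex in range (0, len(sentence)):
--             word = sentence[wordIndex]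
--             sentences[sentenceIndex][wordIndex] = ''.join(list(filter (lambda x: x in permitedCharacters, word)))
--     return (sentences)
-- ===== SOURCE B (Python) =====
-- import string
--
-- def prettySplitBySentences(data):
--     permitted = set(string.ascii_letters + "-,.;:‘’—" + "1234567890" + "$€" + "“”" + "?!")
--     clean = lambda w: ''.join(c for c in w if c in permitted)
--     sentences = []
--     buf = []
--     n = len(data)
--     for i in range(n):
--         w = data[i]
--         if w.endswith('.'):
--             if i + 1 == n:
--                 buf.append(clean(w))
--                 sentences.append(buf)
--                 buf = []
--             elif data[i + 1][:1].isupper():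
--                 buf.append(clean(w))
--                 sentences.append(buf)
--                 buf = []
--             else:
--                 buf.append(clean(w.replace('.', '')))
--         else:
--             buf.append(clean(w))
--     if buf:
--         sentences.append(buf)
--     return sentences
-- ===== Notes on version B (the rewrite author's own statement) =====
-- stated objective: alternative
-- what changed: A repeatedly re-scans the remaining list from the start with takewhile (restarting the scan after every period-strip); B is a single forward pass with a current-sentence buffer that peeks at the next word to decide between flushing a sentence and stripping periods, applying the character filter as it goes.
import Mathlib
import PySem

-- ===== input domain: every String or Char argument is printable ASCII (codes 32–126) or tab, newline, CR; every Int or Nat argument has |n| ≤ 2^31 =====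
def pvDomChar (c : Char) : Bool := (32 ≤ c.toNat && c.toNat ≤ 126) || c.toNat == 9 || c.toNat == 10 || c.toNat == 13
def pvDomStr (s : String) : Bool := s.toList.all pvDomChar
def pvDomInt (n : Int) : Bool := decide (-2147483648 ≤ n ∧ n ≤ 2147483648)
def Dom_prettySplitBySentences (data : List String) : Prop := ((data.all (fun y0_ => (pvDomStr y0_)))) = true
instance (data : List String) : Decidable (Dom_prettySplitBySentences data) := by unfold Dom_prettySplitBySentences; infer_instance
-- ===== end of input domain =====

-- B replaces A's repeated takewhile re-scans by one forward pass with a sentence buffer.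
-- The equivalence proved is about the RETURN value only: Python A mutates its argument
-- list in place (element assignment), B does not.


-- ===== PORT A =====

-- w[-1] == '.'  — Python raises IndexError on w = "" (excluded by Pre_); here false.
def pvEndsDot (w : String) : Bool :=
  match w.toList.getLast? with
  | some c => c == '.'
  | none => false

-- w[0].isupper() — Python raises IndexError on w = "" (excluded by Pre_), here false;
-- Char.isUpper is exact for the ASCII domain Dom_ admits.
def pvStartsUpper (w : String) : Bool :=
  match w.toList.head? with
  | some c => c.isUpper
  | none => false

-- ''.join(filter(lambda x: x != '.', w))
def pvStrip (w : String) : String := String.ofList (w.toList.filter (fun c => c != '.'))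

-- string.ascii_letters + "-,.;:‘’—" + "1234567890" + "$€" + "“”" + "?!"
def pvPermitted : List Char :=
  ("abcdefghijklmnopqrstuvwxyzABCDEFGHIJKLMNOPQRSTUVWXYZ" ++ "-,.;:‘’—" ++ "1234567890" ++ "$€" ++ "“”" ++ "?!").toList

-- ''.join(filter(lambda x: x in permitedCharacters, word))
def pvClean (w : String) : String := String.ofList (w.toList.filter (fun c => pvPermitted.contains c))

-- myTakeWhileInclusive with predicate (not (w[-1] == '.'))
def pvTakeWhileInc (text : List String) : List String :=
  let product := text.takeWhile (fun w => !(pvEndsDot w))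
  if text.length > product.length then
    match PySem.List.pyGet? text (product.length : Int) with
    | some w => product ++ [w]
    | none => product        -- unreachable: product.length < text.length
  else product

-- prettyReadableCharacters: the nested index loops assign the filtered word at EVERY
-- index of every sentence, i.e. a map over sentences of a map over words.
def prettyReadableCharacters (sentences : List (List String)) : List (List String) :=
  sentences.map (fun s => s.map pvClean)

-- total '.'-count, used only for the fuel of the while loop
def pvDots (data : List String) : Nat :=
  (data.map (fun w => (w.toList.filter (fun c => c == '.')).length)).sum

-- the while loop of A, fuel-guarded (each iteration removes a chunk or strips a '.')
def pvLoopA : Nat → List (List String) → List String → List (List String)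
  | 0, acc, _ => acc
  | fuel + 1, acc, data =>
    if data = [] then acc
    else
      let u := pvTakeWhileInc data
      if data.length > u.length then
        match PySem.List.pyGet? data (u.length : Int) with
        | none => acc          -- unreachable: u.length < data.length
        | some next =>
          if pvStartsUpper next then
            pvLoopA fuel (acc ++ [u]) (PySem.List.slice data (some (u.length : Int)) none)
          else
            -- data[len(u)-1] = strip(data[len(u)-1]); u.length ≥ 1 since data ≠ []
            pvLoopA fuel acc
              (PySem.List.pySetD data ((u.length - 1 : Nat) : Int)
                (pvStrip (data.getD (u.length - 1) "")))
      else acc ++ [u]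

def prettySplitBySentences (data : List String) : List (List String) :=
  prettyReadableCharacters (pvLoopA (data.length + pvDots data + 1) [] data)

-- ===== PORT B =====

-- single forward pass: buf is the current sentence (already character-filtered)
def pvGoB : List String → List String → List (List String)
  | buf, [] => if buf = [] then [] else [buf]
  | buf, w :: rest =>
    if pvEndsDot w then
      match rest with
      | [] => [buf ++ [pvClean w]]                 -- last word: flush
      | n :: _ =>
        if pvStartsUpper n then (buf ++ [pvClean w]) :: pvGoB [] rest
        else pvGoB (buf ++ [pvClean (pvStrip w)]) rest
    else pvGoB (buf ++ [pvClean w]) rest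

def prettySplitBySentences_alt (data : List String) : List (List String) := pvGoB [] data

-- ===== PRECONDITION & SPEC =====

-- Pre_ excludes exactly the inputs on which Python A raises IndexError: a list containing
-- an empty word, or a word made only of periods whose successor does not start uppercase
-- (stripping it yields "" which the next takewhile scan indexes with w[-1]).
-- word made only of periods (used only by Pre_/Raises_)
def pvAllDots (w : String) : Bool := w.toList.all (fun c => c == '.')

def Pre_prettySplitBySentences (data : List String) : Prop :=
  (∀ w ∈ data, w ≠ "") ∧
  (∀ p ∈ data.zip data.tail, pvAllDots (Prod.fst p) = true → pvStartsUpper (Prod.snd p) = true)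

instance (data : List String) : Decidable (Pre_prettySplitBySentences data) := by
  unfold Pre_prettySplitBySentences; infer_instance

def pvWitness_prettySplitBySentences : List String := ["Hi.", "All", "good."]

def Spec_prettySplitBySentences (data : List String) (out : List (List String)) : Prop :=
  out = prettySplitBySentences_alt data
instance (data : List String) (out : List (List String)) : Decidable (Spec_prettySplitBySentences data out) := by unfold Spec_prettySplitBySentences; infer_instance

-- ===== CLAIM (what is proved, stated in full; the proofs are below) =====
def Claim_equal_prettySplitBySentences : Prop := ∀ (data : List String), Dom_prettySplitBySentences data → Pre_prettySplitBySentences data → Spec_prettySplitBySentences data (prettySplitBySentences data)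

-- ===== LEMMAS AND PROOFS =====

theorem pvGoB_pass (P : List String) (buf : List String) (rest : List String)
    (h : ∀ w ∈ P, pvEndsDot w = false) :
    pvGoB buf (P ++ rest) = pvGoB (buf ++ P.map pvClean) rest := by
  induction P generalizing buf with
  | nil => simp
  | cons w P ih =>
    have hw : pvEndsDot w = false := h w (by simp)
    simp only [List.cons_append, pvGoB, hw, Bool.false_eq_true, if_false]
    rw [ih (buf ++ [pvClean w]) (fun x hx => h x (by simp [hx]))]
    simp

theorem pvGoB_all_pass (data : List String) (buf : List String)
    (h : ∀ w ∈ data, pvEndsDot w = false) (hnil : data ≠ []) :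
    pvGoB buf data = [buf ++ data.map pvClean] := by
  rw [← List.append_nil data, pvGoB_pass data buf [] h]
  have : buf ++ data.map pvClean ≠ [] := by
    simp [List.map_eq_nil_iff, hnil]
  simp [pvGoB, this]

theorem pvEndsDot_strip (w : String) : pvEndsDot (pvStrip w) = false := by
  unfold pvEndsDot pvStrip
  cases h : (String.ofList (w.toList.filter (fun c => c != '.'))).toList.getLast? with
  | none => rfl
  | some c =>
    have hmem : c ∈ (String.ofList (w.toList.filter (fun c => c != '.'))).toList :=
      List.mem_of_getLast? h
    have hmem' : c ∈ w.toList.filter (fun c => c != '.') := by simpa using hmem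
    have := List.of_mem_filter hmem'
    simp_all

theorem pvDots_append (a b : List String) : pvDots (a ++ b) = pvDots a + pvDots b := by
  simp [pvDots]

theorem pvDots_pos_of_endsDot (w : String) (h : pvEndsDot w = true) :
    1 ≤ (w.toList.filter (fun c => c == '.')).length := by
  unfold pvEndsDot at h
  cases hg : w.toList.getLast? with
  | none => simp [hg] at h
  | some c =>
    simp only [hg] at h
    have hc : c = '.' := by simpa using h
    have hmem : c ∈ w.toList := List.mem_of_getLast? hg
    have : c ∈ w.toList.filter (fun c => c == '.') :=
      List.mem_filter.2 ⟨hmem, by simp [hc]⟩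
    exact List.length_pos_of_mem this

-- main invariant: (clean-mapped) A-loop state = flushed prefix ++ B's pass on the rest
theorem pvLoop_eq_goB : ∀ (fuel : Nat) (acc : List (List String)) (data : List String),
    data.length + pvDots data < fuel →
    prettyReadableCharacters (pvLoopA fuel acc data)
      = prettyReadableCharacters acc ++ pvGoB [] data := by
  intro fuel
  induction fuel with
  | zero => intro acc data h; omega
  | succ fuel ih =>
    intro acc data hfuel
    by_cases hnil : data = []
    · subst hnil; simp [pvLoopA, pvGoB]
    · set P := data.takeWhile (fun w => !(pvEndsDot w)) with hP
      have hPd : ∀ w ∈ P, pvEndsDot w = false := by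
        intro w hw
        have := List.mem_takeWhile_imp (p := fun w => !(pvEndsDot w)) (hP ▸ hw)
        simpa using this
      have hsplit : P ++ data.dropWhile (fun w => !(pvEndsDot w)) = data :=
        List.takeWhile_append_dropWhile
      cases hR : data.dropWhile (fun w => !(pvEndsDot w)) with
      | nil =>
        -- no word ends with '.': the whole of data is the final sentence
        have hdata : P = data := by rw [← hsplit, hR, List.append_nil]
        have hu : pvTakeWhileInc data = data := by
          simp [pvTakeWhileInc, ← hP, hdata]
        simp only [pvLoopA, hnil, if_false, hu]
        rw [pvGoB_all_pass data [] (hdata ▸ hPd) hnil]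
        simp [prettyReadableCharacters]
      | cons d R =>
        have hdata : data = P ++ d :: R := by rw [← hsplit, hR]
        have hd : pvEndsDot d = true := by
          have h2 := List.head?_dropWhile_not (p := fun w => !(pvEndsDot w)) (l := data)
          rw [hR] at h2
          simpa using h2
        have hu : pvTakeWhileInc data = P ++ [d] := by
          simp only [pvTakeWhileInc]
          rw [← hP]
          have hlt : data.length > P.length := by rw [hdata]; simp
          have hget : PySem.List.pyGet? data ((P.length : Nat) : Int) = some d := by
            rw [hdata]; exact PySem.List.pyGet?_append_length P R d
          rw [if_pos hlt, hget]
        have hul : (pvTakeWhileInc data).length = P.length + 1 := by rw [hu]; simp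
        cases hRR : R with
        | nil =>
          -- the period word is last: final sentence
          simp only [pvLoopA, hnil, if_false, hu]
          rw [if_neg (show ¬ data.length > (P ++ [d]).length by rw [hdata, hRR]; simp)]
          have hgo : pvGoB [] data = [(P ++ [d]).map pvClean] := by
            rw [hdata, hRR, show (P ++ [d] : List String) = P ++ ([d] : List String) from rfl,
              pvGoB_pass P [] [d] hPd]
            simp [pvGoB, hd]
          rw [hgo]
          simp [prettyReadableCharacters]
        | cons n R' =>
          have hlen : data.length > (pvTakeWhileInc data).length := by
            rw [hul, hdata, hRR]; simp
          have hget : PySem.List.pyGet? data (((pvTakeWhileInc data).length : Nat) : Int) = some n := by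
            rw [hul, hdata, hRR,
              show (P ++ d :: n :: R' : List String) = (P ++ [d]) ++ n :: R' by simp]
            have h3 := PySem.List.pyGet?_append_length (P ++ [d]) R' n
            simpa using h3
          simp only [pvLoopA, hnil, if_false]
          rw [if_pos hlen, hget]
          by_cases hup : pvStartsUpper n = true
          · -- uppercase next word: flush the chunk
            have hdrop : PySem.List.slice data (some (((pvTakeWhileInc data).length : Nat) : Int)) none
                = n :: R' := by
              rw [PySem.List.slice_from_natCast, hul, hdata, hRR,
                show (P ++ d :: n :: R' : List String) = (P ++ [d]) ++ n :: R' by simp]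
              rw [show P.length + 1 = (P ++ [d]).length by simp, List.drop_left]
            simp only [if_pos hup]
            rw [hdrop]
            have hmu : (n :: R').length + pvDots (n :: R') < fuel := by
              have h1 : data.length = P.length + 1 + (n :: R').length := by
                rw [hdata, hRR]; simp; omega
              have h2 : pvDots (n :: R') ≤ pvDots data := by
                rw [hdata, hRR,
                  show (P ++ d :: n :: R' : List String) = (P ++ [d]) ++ n :: R' by simp,
                  pvDots_append]
                omega
              omega
            rw [ih (acc ++ [pvTakeWhileInc data]) (n :: R') hmu]
            have hgo : pvGoB [] data = ((P ++ [d]).map pvClean) :: pvGoB [] (n :: R') := by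
              rw [hdata, hRR, show (P ++ d :: n :: R' : List String) = P ++ (d :: n :: R') from rfl,
                pvGoB_pass P [] (d :: n :: R') hPd]
              simp [pvGoB, hd, hup]
            rw [hgo, hu]
            simp [prettyReadableCharacters]
          · -- lowercase next word: strip the periods from the chunk's last word, rescan
            simp only [if_neg hup]
            have hidx : (pvTakeWhileInc data).length - 1 = P.length := by omega
            have hgetd : data.getD ((pvTakeWhileInc data).length - 1) "" = d := by
              rw [hidx, hdata]
              rw [List.getD_eq_getElem?_getD]
              simp
            have hset : PySem.List.pySetD data ((((pvTakeWhileInc data).length - 1 : Nat)) : Int)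
                (pvStrip (data.getD ((pvTakeWhileInc data).length - 1) ""))
                = P ++ pvStrip d :: n :: R' := by
              rw [hgetd, PySem.List.pySetD_natCast, hidx, hdata, hRR]
              rw [List.set_append_right _ _ (le_refl P.length)]
              simp
            rw [hset]
            have hmu : (P ++ pvStrip d :: n :: R').length + pvDots (P ++ pvStrip d :: n :: R') < fuel := by
              have hlen2 : (P ++ pvStrip d :: n :: R').length = data.length := by
                rw [hdata, hRR]; simp
              have hdstrip : pvDots [pvStrip d] = 0 := by
                simp only [pvDots, List.map_cons, List.map_nil, List.sum_cons, List.sum_nil,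
                  Nat.add_zero, List.length_eq_zero_iff]
                rw [List.filter_eq_nil_iff]
                intro c hc
                have hc' : c ∈ (pvStrip d).toList := hc
                unfold pvStrip at hc'
                have : c ∈ d.toList.filter (fun c => c != '.') := by simpa using hc'
                have hne : c ≠ '.' := by simpa using List.of_mem_filter this
                simp [hne]
              have hddots : 1 ≤ pvDots [d] := by
                have := pvDots_pos_of_endsDot d hd
                simpa [pvDots] using this
              have e1 : pvDots (P ++ pvStrip d :: n :: R')
                  = pvDots P + (pvDots [pvStrip d] + pvDots (n :: R')) := by
                rw [show (pvStrip d :: n :: R' : List String) = [pvStrip d] ++ n :: R' from rfl,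
                  pvDots_append, pvDots_append]
              have e2 : pvDots data = pvDots P + (pvDots [d] + pvDots (n :: R')) := by
                rw [hdata, hRR, show (d :: n :: R' : List String) = [d] ++ n :: R' from rfl,
                  pvDots_append, pvDots_append]
              omega
            rw [ih acc (P ++ pvStrip d :: n :: R') hmu]
            have hgo : pvGoB [] (P ++ pvStrip d :: n :: R') = pvGoB [] data := by
              rw [pvGoB_pass P [] (pvStrip d :: n :: R') hPd]
              rw [hdata, hRR, show (P ++ d :: n :: R' : List String) = P ++ (d :: n :: R') from rfl,
                pvGoB_pass P [] (d :: n :: R') hPd]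
              simp [pvGoB, pvEndsDot_strip, hd, eq_false_of_ne_true hup]
            rw [hgo]

-- ===== VERDICT (by name: the statement is the Claim_ definition above) =====
theorem prettySplitBySentences_spec : Claim_equal_prettySplitBySentences := by
  intro data _ _
  unfold Spec_prettySplitBySentences prettySplitBySentences prettySplitBySentences_alt
  rw [pvLoop_eq_goB (data.length + pvDots data + 1) [] data (by omega)]
  simp [prettyReadableCharacters]
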